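-- pv_equiv track=rewrite | github.com/rodrigopires01/Python | Teste_Maio30/Prog_D3.py | checkMaiorMenor
-- ===== SOURCE A (Python) =====
-- def checkMaiorMenor(num, listaNum):
--     maior = listaNum[0]
--     menor = listaNum[0]
--     x = 0
--
--     while x < len(listaNum):
--         if listaNum[x] < menor:
--             menor = listaNum[x]
--
--         if listaNum[x] > maior:
--             maior = listaNum[x]
--         x = x + 1
--
--     if num == maior:
--         return 'o maior até agora.'
--     elif num == menor:
--         return 'o menor até agora.'
--     else:
--         return 'um numero normal.'
-- ===== SOURCE B (Python) =====
-- def checkMaiorMenor(num, listaNum):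
--     s = sorted(listaNum)
--     maior = s[-1]
--     menor = s[0]
--     if num == maior:
--         return 'o maior até agora.'
--     elif num == menor:
--         return 'o menor até agora.'
--     else:
--         return 'um numero normal.'
-- ===== Notes on version B (the rewrite author's own statement) =====
-- stated objective: idiomatic
-- what changed: Replaces the manual index-based running-extrema while loop with a single sorted() call, reading the maximum and minimum as the last and first elements of the sorted list.
import Mathlib
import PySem

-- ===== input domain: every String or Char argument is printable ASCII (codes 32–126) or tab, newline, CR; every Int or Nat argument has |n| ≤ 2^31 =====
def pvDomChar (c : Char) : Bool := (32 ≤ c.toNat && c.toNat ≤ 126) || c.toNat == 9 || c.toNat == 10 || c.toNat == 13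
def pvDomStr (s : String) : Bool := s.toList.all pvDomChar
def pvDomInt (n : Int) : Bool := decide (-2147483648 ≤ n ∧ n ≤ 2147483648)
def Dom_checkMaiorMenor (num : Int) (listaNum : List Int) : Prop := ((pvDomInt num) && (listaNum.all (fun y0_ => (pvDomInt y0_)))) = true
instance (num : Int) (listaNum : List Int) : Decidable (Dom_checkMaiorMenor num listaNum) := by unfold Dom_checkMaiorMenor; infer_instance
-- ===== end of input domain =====

-- B replaces A's running-extrema while loop by one sorted() call and indexing (idiomatic, not faster).

-- ===== PORT A =====
-- A's while loop over indices 0..len-1 updating (menor, maior) is ported as a foldl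
-- over the list with the same state; the first element is visited again, as in A.
def checkMaiorMenor (num : Int) (listaNum : List Int) : String :=
  match listaNum with
  | [] => ""   -- A raises IndexError here; excluded by Pre_
  | h :: _ =>
    let st := listaNum.foldl
      (fun (mm : Int × Int) v =>
        (if v < mm.2 then
           (if v > mm.1 then v else mm.1, v)
         else
           (if v > mm.1 then v else mm.1, mm.2)))
      (h, h)
    if num = st.1 then "o maior até agora."
    else if num = st.2 then "o menor até agora."
    else "um numero normal."

-- ===== PORT B =====
def checkMaiorMenor_alt (num : Int) (listaNum : List Int) : String :=
  let s := PySem.List.sorted listaNum (fun x => x) false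
  match PySem.List.pyGet? s (-1), PySem.List.pyGet? s 0 with
  | some maior, some menor =>
    if num = maior then "o maior até agora."
    else if num = menor then "o menor até agora."
    else "um numero normal."
  | _, _ => ""   -- B raises IndexError here; excluded by Pre_

-- ===== PRECONDITION & SPEC =====
-- Both A and B raise IndexError on the empty list (listaNum[0] / s[-1]); Pre_ excludes it.
def Pre_checkMaiorMenor (num : Int) (listaNum : List Int) : Prop := listaNum ≠ []
instance (num : Int) (listaNum : List Int) : Decidable (Pre_checkMaiorMenor num listaNum) := by unfold Pre_checkMaiorMenor; infer_instance
def pvWitness_checkMaiorMenor : Int × List Int := (3, [1, 3, 2])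

def Spec_checkMaiorMenor (num : Int) (listaNum : List Int) (out : String) : Prop := out = checkMaiorMenor_alt num listaNum
instance (num : Int) (listaNum : List Int) (out : String) : Decidable (Spec_checkMaiorMenor num listaNum out) := by unfold Spec_checkMaiorMenor; infer_instance

-- ===== CLAIM (what is proved, stated in full; the proofs are below) =====
def Claim_equal_checkMaiorMenor : Prop := ∀ (num : Int) (listaNum : List Int), Dom_checkMaiorMenor num listaNum → Pre_checkMaiorMenor num listaNum → Spec_checkMaiorMenor num listaNum (checkMaiorMenor num listaNum)

-- ===== LEMMAS AND PROOFS =====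

-- A's fold computes componentwise max/min.
theorem foldA_eq (l : List Int) (a b : Int) :
    l.foldl
      (fun (mm : Int × Int) v =>
        (if v < mm.2 then
           (if v > mm.1 then v else mm.1, v)
         else
           (if v > mm.1 then v else mm.1, mm.2)))
      (a, b)
    = (l.foldl max a, l.foldl min b) := by
  induction l generalizing a b with
  | nil => rfl
  | cons x t ih =>
    simp only [List.foldl_cons]
    rw [ih]
    have h1 : (if x < b then x else b) = min b x := by rcases min_choice b x with h | h <;> rw [h] <;> split_ifs <;> omega
    have h2 : (if x > a then x else a) = max a x := by rcases max_choice a x with h | h <;> rw [h] <;> split_ifs <;> omega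
    split_ifs <;> simp_all

theorem foldl_max_mem (t : List Int) (a : Int) : t.foldl max a ∈ a :: t := by
  induction t generalizing a with
  | nil => simp
  | cons x t ih =>
    simp only [List.foldl_cons]
    rcases List.mem_cons.1 (ih (max a x)) with h | h
    · rcases max_choice a x with h' | h' <;> rw [h'] at h ⊢ <;> simp [h]
    · simp [h]

theorem foldl_max_le (t : List Int) (a : Int) : ∀ y ∈ a :: t, y ≤ t.foldl max a := by
  induction t generalizing a with
  | nil => simp
  | cons x t ih =>
    intro y hy
    simp only [List.foldl_cons]
    rcases List.mem_cons.1 hy with rfl | hy'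
    · exact le_trans (le_max_left y x) (ih (max y x) (max y x) (by simp))
    rcases List.mem_cons.1 hy' with rfl | hy''
    · exact le_trans (le_max_right a y) (ih (max a y) (max a y) (by simp))
    · exact ih (max a x) y (by simp [hy''])

theorem foldl_min_mem (t : List Int) (a : Int) : t.foldl min a ∈ a :: t := by
  induction t generalizing a with
  | nil => simp
  | cons x t ih =>
    simp only [List.foldl_cons]
    rcases List.mem_cons.1 (ih (min a x)) with h | h
    · rcases min_choice a x with h' | h' <;> rw [h'] at h ⊢ <;> simp [h]
    · simp [h]

theorem foldl_min_ge (t : List Int) (a : Int) : ∀ y ∈ a :: t, t.foldl min a ≤ y := by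
  induction t generalizing a with
  | nil => simp
  | cons x t ih =>
    intro y hy
    simp only [List.foldl_cons]
    rcases List.mem_cons.1 hy with rfl | hy'
    · exact le_trans (ih (min y x) (min y x) (by simp)) (min_le_left y x)
    rcases List.mem_cons.1 hy' with rfl | hy''
    · exact le_trans (ih (min a y) (min a y) (by simp)) (min_le_right a y)
    · exact ih (min a x) y (by simp [hy''])

-- the last element of the ascending sorted list is ≥ every element of the input
theorem sorted_getLast_ge (xs : List Int)
    (hne : PySem.List.sorted xs (fun x => x) false ≠ []) (y : Int) (hy : y ∈ xs) :
    y ≤ (PySem.List.sorted xs (fun x => x) false).getLast hne := by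
  have hlen : 0 < (PySem.List.sorted xs (fun x => x) false).length :=
    List.length_pos_iff.2 hne
  have hy' : y ∈ PySem.List.sorted xs (fun x => x) false := by
    rw [PySem.List.mem_sorted]; exact hy
  obtain ⟨p, hp, hpe⟩ := List.mem_iff_getElem.1 hy'
  rw [List.getLast_eq_getElem]
  calc y = (PySem.List.sorted xs (fun x => x) false)[p] := hpe.symm
    _ ≤ _ := PySem.List.sorted_id_getElem_mono (xs := xs)
        (p := p) (q := (PySem.List.sorted xs (fun x => x) false).length - 1)
        (by omega) (by omega)

theorem checkMaiorMenor_spec : Claim_equal_checkMaiorMenor := by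
  unfold Claim_equal_checkMaiorMenor
  intro num listaNum _ hpre
  unfold Spec_checkMaiorMenor
  match listaNum, hpre with
  | h :: t, _ =>
    simp only [checkMaiorMenor, checkMaiorMenor_alt]
    rw [foldA_eq]
    simp only [List.foldl_cons, max_self, min_self]
    have hsne : PySem.List.sorted (h :: t) (fun x => x) false ≠ [] := by
      intro hnil
      exact (List.cons_ne_nil h t) ((PySem.List.sorted_eq_nil_iff _ _ _).1 hnil)
    have hlen : 0 < (PySem.List.sorted (h :: t) (fun x => x) false).length :=
      List.length_pos_iff.2 hsne
    have hget0 : PySem.List.pyGet? (PySem.List.sorted (h :: t) (fun x => x) false) 0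
        = some ((PySem.List.sorted (h :: t) (fun x => x) false)[0]'hlen) := by
      rw [PySem.List.pyGet?_zero, List.getElem?_eq_getElem hlen]
    have hgetm1 : PySem.List.pyGet? (PySem.List.sorted (h :: t) (fun x => x) false) (-1)
        = some ((PySem.List.sorted (h :: t) (fun x => x) false).getLast hsne) := by
      rw [PySem.List.pyGet?_neg_one, List.getLast?_eq_some_getLast]
    -- the last of the sorted list is A's maximum
    have hmax : t.foldl max h = (PySem.List.sorted (h :: t) (fun x => x) false).getLast hsne := by
      apply le_antisymm
      · exact sorted_getLast_ge (h :: t) hsne _ (foldl_max_mem t h)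
      · apply foldl_max_le t h
        have hmem := List.getLast_mem hsne
        rw [PySem.List.mem_sorted] at hmem
        exact hmem
    -- the head of the sorted list is A's minimum
    obtain ⟨m, t', hcons⟩ := List.exists_cons_of_ne_nil hsne
    have hmin : t.foldl min h = (PySem.List.sorted (h :: t) (fun x => x) false)[0]'hlen := by
      have hm0 : (PySem.List.sorted (h :: t) (fun x => x) false)[0]'hlen = m := by
        simp [hcons]
      rw [hm0]
      apply le_antisymm
      · apply foldl_min_ge t h
        have hmem : m ∈ PySem.List.sorted (h :: t) (fun x => x) false := by simp [hcons]
        rw [PySem.List.mem_sorted] at hmem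
        exact hmem
      · exact PySem.List.key_head_sorted_le (xs := h :: t) (key := fun x => x)
          hcons _ (foldl_min_mem t h)
    rw [hgetm1, hget0, ← hmax, ← hmin]
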